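-- pv_equiv track=rewrite | github.com/individual-brain-charting/public_analysis_code | ibc_public/utils_pipeline.py | _guess_run_and_dir_from_session_id
-- ===== SOURCE A (Python) =====
-- def _guess_run_and_dir_from_session_id(session_id):
--             run_, dir_ = None, None
--             parts = session_id.split('_')
--             for part in parts:
--                 if part[:4] == 'run-':
--                     run_ = part[4:]
--                 if part[:4] == 'dir-':
--                     dir_ = part[4:]
--             return run_, dir_
-- ===== SOURCE B (Python) =====
-- def _guess_run_and_dir_from_session_id(session_id):
--     d = {}
--     for part in session_id.split('_'):
--         if '-' in part:
--             key, rest = part.split('-', 1)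
--             d[key] = rest
--     return d.get('run'), d.get('dir')
-- ===== Notes on version B (the rewrite author's own statement) =====
-- stated objective: idiomatic
-- what changed: Instead of testing each part for the literal prefixes 'run-'/'dir-' while threading two mutable result slots, B builds a generic prefix->remainder dictionary from part.split('-', 1) and finishes with two dict lookups.
import Mathlib
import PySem

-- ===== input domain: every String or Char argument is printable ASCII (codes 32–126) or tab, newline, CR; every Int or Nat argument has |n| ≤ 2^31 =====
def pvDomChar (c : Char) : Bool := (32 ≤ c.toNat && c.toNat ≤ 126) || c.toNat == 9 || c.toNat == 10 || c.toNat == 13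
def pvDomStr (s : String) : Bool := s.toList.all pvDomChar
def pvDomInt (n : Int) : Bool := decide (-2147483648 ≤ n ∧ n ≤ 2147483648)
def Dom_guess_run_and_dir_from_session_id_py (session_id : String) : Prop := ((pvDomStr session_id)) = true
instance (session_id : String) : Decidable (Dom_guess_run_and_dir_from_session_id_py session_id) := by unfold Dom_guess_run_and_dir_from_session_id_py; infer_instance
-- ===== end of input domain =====

-- B replaces A's hard-coded 'run-'/'dir-' prefix tests with a generic prefix->remainder dict
-- built from part.split('-', 1), finished by two lookups (idiomatic; same asymptotic cost).

-- ===== PORT A =====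
-- loop body of A: the two prefix tests, in order, over the running (run_, dir_) state
def pvAstep (st : Option String × Option String) (part : List Char) :
    Option String × Option String :=
  let st1 :=
    if PySem.List.slice part none (some 4) = ['r', 'u', 'n', '-'] then
      (some (String.ofList (PySem.List.slice part (some 4) none)), st.2)
    else st
  if PySem.List.slice part none (some 4) = ['d', 'i', 'r', '-'] then
    (st1.1, some (String.ofList (PySem.List.slice part (some 4) none)))
  else st1

def guess_run_and_dir_from_session_id_py (session_id : String) :
    Option String × Option String :=
  (PySem.Chars.splitOn session_id.toList ['_']).foldl pvAstep (none, none)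

-- ===== PORT B =====
-- loop body of B: 'key, rest = part.split('-', 1); d[key] = rest' under the '-' in part guard
-- (the fallthrough arm of the match is unreachable: split('-',1) yields two pieces when '-' ∈ part)
def pvBstep (d : PySem.Dict (List Char) (List Char)) (part : List Char) :
    PySem.Dict (List Char) (List Char) :=
  if '-' ∈ part then
    match PySem.Chars.splitOnMax part ['-'] 1 with
    | [key, rest] => d.insert key rest
    | _ => d
  else d

def guess_run_and_dir_from_session_id_py_alt (session_id : String) :
    Option String × Option String :=
  let d := (PySem.Chars.splitOn session_id.toList ['_']).foldl pvBstep PySem.Dict.empty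
  ((d.get? ['r', 'u', 'n']).map String.ofList, (d.get? ['d', 'i', 'r']).map String.ofList)

-- ===== PRECONDITION & SPEC =====
def Spec_guess_run_and_dir_from_session_id_py (session_id : String) (out : Option String × Option String) : Prop := out = guess_run_and_dir_from_session_id_py_alt session_id
instance (session_id : String) (out : Option String × Option String) : Decidable (Spec_guess_run_and_dir_from_session_id_py session_id out) := by unfold Spec_guess_run_and_dir_from_session_id_py; infer_instance

-- ===== CLAIM (what is proved, stated in full; the proofs are below) =====
def Claim_equal_guess_run_and_dir_from_session_id_py : Prop := ∀ (session_id : String), Dom_guess_run_and_dir_from_session_id_py session_id → Spec_guess_run_and_dir_from_session_id_py session_id (guess_run_and_dir_from_session_id_py session_id)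

-- ===== LEMMAS AND PROOFS =====

-- any list with '-' splits as a ++ '-' :: b with no '-' in a
lemma pv_decomp (p : List Char) (h : '-' ∈ p) :
    ∃ a b : List Char, p = a ++ '-' :: b ∧ '-' ∉ a := by
  induction p with
  | nil => cases h
  | cons c t ih =>
    by_cases hc : c = '-'
    · exact ⟨[], t, by simp [hc], by simp⟩
    · rcases List.mem_cons.mp h with h1 | h1
      · exact absurd h1.symm hc
      · rcases ih h1 with ⟨a, b, rfl, ha⟩
        refine ⟨c :: a, b, rfl, ?_⟩
        intro hmem
        rcases List.mem_cons.mp hmem with h2 | h2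
        · exact hc h2.symm
        · exact ha h2

lemma pv_go_zero (fuel : Nat) (b : List Char) (acc : List (List Char)) :
    PySem.Chars.splitOnMax.go ['-'] fuel 0 b [] acc = (b :: acc).reverse := by
  cases fuel with
  | zero => simp [PySem.Chars.splitOnMax.go]
  | succ n => cases b <;> simp [PySem.Chars.splitOnMax.go]

lemma pv_go_consume (b : List Char) :
    ∀ (a : List Char) (fuel : Nat) (cur : List Char) (acc : List (List Char)), '-' ∉ a →
      PySem.Chars.splitOnMax.go ['-'] (fuel + (a.length + 1)) 1 (a ++ '-' :: b) cur acc
        = (b :: (cur.reverse ++ a) :: acc).reverse := by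
  intro a
  induction a with
  | nil =>
    intro fuel cur acc _
    simp [PySem.Chars.splitOnMax.go, List.isPrefixOf, pv_go_zero]
  | cons c t ih =>
    intro fuel cur acc ha
    have hc : c ≠ '-' := fun h => ha (by simp [h])
    have ht : '-' ∉ t := fun h => ha (by simp [h])
    have : fuel + ((c :: t).length + 1) = (fuel + (t.length + 1)) + 1 := by simp; omega
    rw [this]
    simp only [List.cons_append, PySem.Chars.splitOnMax.go]
    rw [if_neg (by omega)]
    have hpre : List.isPrefixOf ['-'] (c :: (t ++ '-' :: b)) = false := by
      simp [List.isPrefixOf, hc, Ne.symm hc]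
    rw [hpre]
    simp only [Bool.false_eq_true, if_false]
    rw [ih (fuel) (c :: cur) acc ht]
    simp

lemma pv_splitOnMax_eq (a b : List Char) (ha : '-' ∉ a) :
    PySem.Chars.splitOnMax (a ++ '-' :: b) ['-'] 1 = [a, b] := by
  unfold PySem.Chars.splitOnMax
  rw [if_neg (by omega)]
  have hlen : (a ++ '-' :: b).length + 1 = (b.length + 1) + (a.length + 1) := by
    simp; omega
  rw [hlen, show ((1 : Int).toNat = 1) from rfl]
  have := pv_go_consume b a (b.length + 1) [] [] ha
  simpa using this

lemma pv_take4_iff (a b : List Char) (ha : '-' ∉ a) (x y z : Char)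
    (hx : x ≠ '-') (hy : y ≠ '-') (hz : z ≠ '-') :
    (a ++ '-' :: b).take 4 = [x, y, z, '-'] ↔ a = [x, y, z] := by
  constructor
  · intro h
    match a, ha with
    | [], ha => simp [List.take] at h; exact absurd h.1.symm hx
    | [c0], ha => simp [List.take] at h; exact absurd h.2.1.symm hy
    | [c0, c1], ha => simp [List.take] at h; exact absurd h.2.2.1.symm hz
    | [c0, c1, c2], ha => simp [List.take] at h; simp [h.1, h.2.1, h.2.2]
    | c0 :: c1 :: c2 :: c3 :: t, ha =>
      simp [List.take] at h
      exact (ha (by simp [h.2.2.2])).elim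
  · rintro rfl; simp [List.take]

lemma pv_slice_to (p : List Char) : PySem.List.slice p none (some 4) = p.take 4 := by
  rw [PySem.List.slice_to p (by omega)]; rfl

lemma pv_slice_from (p : List Char) : PySem.List.slice p (some 4) none = p.drop 4 := by
  rw [PySem.List.slice_from p (by omega)]; rfl

lemma pv_step_couple (d : PySem.Dict (List Char) (List Char)) (p : List Char) :
    pvAstep ((d.get? ['r','u','n']).map String.ofList, (d.get? ['d','i','r']).map String.ofList) p
      = (((pvBstep d p).get? ['r','u','n']).map String.ofList,
         ((pvBstep d p).get? ['d','i','r']).map String.ofList) := by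
  by_cases hm : '-' ∈ p
  · rcases pv_decomp p hm with ⟨a, bb, rfl, haa⟩
    have hB : pvBstep d (a ++ '-' :: bb) = d.insert a bb := by
      simp [pvBstep, hm, pv_splitOnMax_eq a bb haa]
    have hrun := pv_take4_iff a bb haa 'r' 'u' 'n' (by decide) (by decide) (by decide)
    have hdir := pv_take4_iff a bb haa 'd' 'i' 'r' (by decide) (by decide) (by decide)
    by_cases hR : a = ['r', 'u', 'n']
    · subst hR
      simp only [List.cons_append, List.nil_append] at hB
      simp [pvAstep, hB, pv_slice_to, pv_slice_from, PySem.Dict.get?_insert]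
    · by_cases hD : a = ['d', 'i', 'r']
      · subst hD
        simp only [List.cons_append, List.nil_append] at hB
        simp [pvAstep, hB, pv_slice_to, pv_slice_from, PySem.Dict.get?_insert]
      · simp only [pvAstep, hB, pv_slice_to, pv_slice_from, PySem.Dict.get?_insert]
        rw [if_neg (fun h => hR (hrun.mp h)), if_neg (fun h => hD (hdir.mp h)),
          if_neg (Ne.symm hR), if_neg (Ne.symm hD)]
  · have hB : pvBstep d p = d := by simp [pvBstep, hm]
    have hR : p.take 4 ≠ ['r', 'u', 'n', '-'] := by
      intro h; exact hm (List.take_subset 4 p (h ▸ (by simp : '-' ∈ (['r','u','n','-'] : List Char))))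
    have hD : p.take 4 ≠ ['d', 'i', 'r', '-'] := by
      intro h; exact hm (List.take_subset 4 p (h ▸ (by simp : '-' ∈ (['d','i','r','-'] : List Char))))
    simp [pvAstep, hB, pv_slice_to, hR, hD]

lemma pv_fold_couple (parts : List (List Char)) :
    ∀ d : PySem.Dict (List Char) (List Char),
      parts.foldl pvAstep
          ((d.get? ['r','u','n']).map String.ofList, (d.get? ['d','i','r']).map String.ofList)
        = (((parts.foldl pvBstep d).get? ['r','u','n']).map String.ofList,
           ((parts.foldl pvBstep d).get? ['d','i','r']).map String.ofList) := by
  induction parts with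
  | nil => intro d; rfl
  | cons p t ih =>
    intro d
    simp only [List.foldl_cons, pv_step_couple d p]
    exact ih (pvBstep d p)

-- ===== VERDICT (by name: the statement is the Claim_ definition above) =====
theorem guess_run_and_dir_from_session_id_py_spec : Claim_equal_guess_run_and_dir_from_session_id_py := by
  intro session_id _
  unfold Spec_guess_run_and_dir_from_session_id_py
  unfold guess_run_and_dir_from_session_id_py guess_run_and_dir_from_session_id_py_alt
  have := pv_fold_couple (PySem.Chars.splitOn session_id.toList ['_']) PySem.Dict.empty
  simpa using this
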